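-- pv_equiv track=rewrite | github.com/pypi-data/pypi-mirror-375 | packages/flavorpack/flavorpack-0.0.4.post8-py311-none-manylinux2014_aarch64.whl/flavor/archive/operations.py | pack_operations
-- ===== SOURCE A (Python) =====
-- def pack_operations(operations: list[int]) -> int:
--     """
--     Pack a list of operations into a single 64-bit integer.
--
--     Operations are processed from index 0 to N.
--     Maximum 8 operations can be packed.
--
--     Args:
--         operations: List of operation values
--
--     Returns:
--         Packed integer representation
--
--     Example:
--         [TAR, GZIP, AES] -> 0x0000000000302011
--     """
--     if len(operations) > 8:
--         raise ValueError(f"Maximum 8 operations supported, got {len(operations)}")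
--
--     packed = 0
--     for i, op in enumerate(operations):
--         if op < 0 or op > 0xFF:
--             raise ValueError(f"Operation {op} out of range (0-255)")
--         packed |= (op & 0xFF) << (i * 8)
--
--     return packed
-- ===== SOURCE B (Python) =====
-- def pack_operations(operations: list[int]) -> int:
--     """Pack up to 8 byte-sized operations into one little-endian integer."""
--     if len(operations) > 8:
--         raise ValueError(f"Maximum 8 operations supported, got {len(operations)}")
--     return int.from_bytes(bytes(operations), 'little')
-- ===== Notes on version B (the rewrite author's own statement) =====
-- stated objective: idiomatic
-- what changed: Replaces the index-enumerating shift/or bit-packing loop with a single little-endian decode int.from_bytes(bytes(operations), 'little'), letting bytes() do the 0-255 range validation.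
import Mathlib
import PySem

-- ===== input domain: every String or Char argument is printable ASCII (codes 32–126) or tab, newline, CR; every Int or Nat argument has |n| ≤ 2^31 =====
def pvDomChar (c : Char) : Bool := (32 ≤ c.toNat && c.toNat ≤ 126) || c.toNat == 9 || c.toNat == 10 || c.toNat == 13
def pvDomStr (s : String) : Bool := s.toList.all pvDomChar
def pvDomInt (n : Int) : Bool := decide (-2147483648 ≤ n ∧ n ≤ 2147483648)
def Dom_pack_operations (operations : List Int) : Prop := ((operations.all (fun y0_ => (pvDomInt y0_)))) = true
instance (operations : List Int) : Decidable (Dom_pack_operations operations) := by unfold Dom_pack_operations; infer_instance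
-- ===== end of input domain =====

-- B replaces A's enumerate/shift/or bit-packing loop with a single little-endian
-- byte decode (int.from_bytes(bytes(operations), 'little')): idiomatic, same cost.

-- ===== PORT A =====
-- the loop 'for i, op in enumerate(operations): packed |= (op & 0xFF) << (i*8)';
-- the shift count i*8 is nonnegative here, so '.toNat' on it is exact.
def pack_operations (operations : List Int) : Int :=
  (PySem.List.enumerate operations).foldl
    (fun packed p => PySem.Int.bor packed ((PySem.Int.band p.2 0xFF) <<< (p.1 * 8).toNat)) 0

-- ===== PORT B =====
-- int.from_bytes(bytes(operations), 'little'): little-endian Horner decode of the byte list.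
def pack_operations_alt (operations : List Int) : Int :=
  operations.foldr (fun op acc => op + 256 * acc) 0

-- ===== PRECONDITION & SPEC =====
-- Exactly the inputs where the Python A returns: at most 8 operations, each in 0..255
-- (otherwise both A and B raise ValueError).
def Pre_pack_operations (operations : List Int) : Prop :=
  operations.length ≤ 8 ∧ ∀ op ∈ operations, 0 ≤ op ∧ op ≤ 255
instance (operations : List Int) : Decidable (Pre_pack_operations operations) := by
  unfold Pre_pack_operations; infer_instance

def pvWitness_pack_operations : List Int := [17, 32, 48]

def Spec_pack_operations (operations : List Int) (out : Int) : Prop := out = pack_operations_alt operations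
instance (operations : List Int) (out : Int) : Decidable (Spec_pack_operations operations out) := by unfold Spec_pack_operations; infer_instance

-- ===== CLAIM (what is proved, stated in full; the proofs are below) =====
def Claim_equal_pack_operations : Prop := ∀ (operations : List Int), Dom_pack_operations operations → Pre_pack_operations operations → Spec_pack_operations operations (pack_operations operations)

-- ===== LEMMAS AND PROOFS =====

-- Disjoint-or is addition: if a fits below bit k, or-ing in b <<< k just adds it.
lemma lor_shiftLeft_eq_add : ∀ (k a b : Nat), a < 2 ^ k → a ||| (b <<< k) = a + b * 2 ^ k := by
  intro k
  induction k with
  | zero =>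
      intro a b h
      interval_cases a
      simp [Nat.shiftLeft_eq]
  | succ k ih =>
      intro a b h
      have hdecomp : Nat.bit (a.testBit 0) (a >>> 1) = a := Nat.bit_testBit_zero_shiftRight_one a
      have hshift : b <<< (k + 1) = Nat.bit false (b <<< k) := by
        simp [Nat.bit, Nat.shiftLeft_eq, Nat.pow_succ]
        ring
      have hlt : a >>> 1 < 2 ^ k := by
        have := Nat.bit_lt_two_pow_succ_iff (b := a.testBit 0) (x := a >>> 1) (n := k)
        rw [hdecomp] at this
        exact this.mp h
      calc a ||| (b <<< (k + 1))
          = Nat.bit (a.testBit 0) (a >>> 1) ||| Nat.bit false (b <<< k) := by rw [hdecomp, hshift]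
        _ = Nat.bit (a.testBit 0 || false) ((a >>> 1) ||| (b <<< k)) := Nat.lor_bit _ _ _ _
        _ = Nat.bit (a.testBit 0) ((a >>> 1) + b * 2 ^ k) := by rw [ih _ b hlt, Bool.or_false]
        _ = a + b * 2 ^ (k + 1) := by
            rw [Nat.bit_val] at hdecomp ⊢
            rw [Nat.shiftRight_one] at hdecomp ⊢
            have hb : b * 2 ^ (k + 1) = 2 * (b * 2 ^ k) := by ring
            omega

-- One step of A's loop on in-range data: or-ing (op &&& 255) <<< 8*i adds op * 256^i.
lemma step_eq_add (acc op : Nat) (i : Nat) (hacc : acc < 256 ^ i) (hop : op < 256) :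
    PySem.Int.bor (acc : Int) ((PySem.Int.band (op : Int) 0xFF) <<< ((((i : Int) * 8).toNat : Nat) : Int))
      = ((acc + op * 256 ^ i : Nat) : Int) := by
  have hband : PySem.Int.band (op : Int) 0xFF = ((op : Nat) : Int) := by
    have : (0xFF : Int) = ((255 : Nat) : Int) := by norm_num
    rw [this, PySem.Int.band_natCast]
    congr 1
    have := Nat.and_two_pow_sub_one_eq_mod op 8
    norm_num at this
    rw [this, Nat.mod_eq_of_lt hop]
  have htoNat : (((i : Int) * 8).toNat) = 8 * i := by
    omega
  rw [hband, htoNat]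
  rw [Int.shiftLeft_natCast, PySem.Int.bor_natCast]
  have h2 : acc < 2 ^ (8 * i) := by
    calc acc < 256 ^ i := hacc
    _ = 2 ^ (8 * i) := by rw [Nat.pow_mul]
  congr 1
  rw [lor_shiftLeft_eq_add (8 * i) acc op h2, Nat.pow_mul]

-- Loop invariant: folding A's step over 'enumerate ops i' starting from acc < 256^i
-- produces acc + 256^i * (B's Horner value of ops).
lemma pack_loop (ops : List Int) : ∀ (i acc : Nat), acc < 256 ^ i →
    (∀ op ∈ ops, 0 ≤ op ∧ op ≤ 255) →
    (PySem.List.enumerate ops (i : Int)).foldl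
        (fun packed p => PySem.Int.bor packed ((PySem.Int.band p.2 0xFF) <<< (p.1 * 8).toNat)) (acc : Int)
      = (acc : Int) + (256 : Int) ^ i * ops.foldr (fun op acc => op + 256 * acc) 0 := by
  induction ops with
  | nil => intro i acc _ _; simp [PySem.List.enumerate_nil]
  | cons op ops ih =>
      intro i acc hacc hrange
      obtain ⟨hop0, hop255⟩ := hrange op (List.mem_cons_self ..)
      have hrest : ∀ o ∈ ops, 0 ≤ o ∧ o ≤ 255 := fun o ho => hrange o (List.mem_cons_of_mem _ ho)
      have hopNat : op = ((op.toNat : Nat) : Int) := (Int.toNat_of_nonneg hop0).symm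
      have hoplt : op.toNat < 256 := by omega
      rw [PySem.List.enumerate_cons]
      simp only [List.foldl_cons]
      rw [hopNat, step_eq_add acc op.toNat i hacc hoplt]
      have hacc' : acc + op.toNat * 256 ^ i < 256 ^ (i + 1) := by
        have : op.toNat * 256 ^ i ≤ 255 * 256 ^ i := Nat.mul_le_mul_right _ (by omega)
        calc acc + op.toNat * 256 ^ i < 256 ^ i + 255 * 256 ^ i := by omega
        _ = 256 ^ (i + 1) := by ring
      have hcast : ((i : Int) + 1) = (((i + 1 : Nat) : Nat) : Int) := by push_cast; ring
      rw [hcast, ih (i + 1) (acc + op.toNat * 256 ^ i) hacc' hrest]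
      simp only [List.foldr_cons]
      push_cast
      ring

-- ===== VERDICT (by name: the statement is the Claim_ definition above) =====
theorem pack_operations_spec : Claim_equal_pack_operations := by
  intro ops _ hpre
  unfold Spec_pack_operations pack_operations pack_operations_alt
  have h := pack_loop ops 0 0 (by norm_num) hpre.2
  simpa using h
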